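-- pv_equiv track=rewrite | github.com/pokealarm/pokealarm | PokeAlarm/Utils.py | calculate_evolution_cost
-- ===== SOURCE A (Python) =====
-- def calculate_evolution_cost(monster_id, target_id, evolutions, evolution_costs):
--     if monster_id == target_id or not ([True for s in evolutions if target_id == s[0]]):
--         return 0
--     evo_candy_cost = evolution_costs[0]
--
--     for evo_id, evo_form_id in evolutions:
--         if evo_id == target_id:
--             return evo_candy_cost
--         evo_candy_cost += evolution_costs[1]
--
--     return evo_candy_cost
-- ===== SOURCE B (Python) =====
-- def calculate_evolution_cost(monster_id, target_id, evolutions, evolution_costs):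
--     if monster_id == target_id:
--         return 0
--     i = next((idx for idx, evo in enumerate(evolutions) if evo[0] == target_id), None)
--     if i is None:
--         return 0
--     if i == 0:
--         return evolution_costs[0]
--     return evolution_costs[0] + i * evolution_costs[1]
-- ===== Notes on version B (the rewrite author's own statement) =====
-- stated objective: simpler
-- what changed: Replaces A's two scans (a presence list-comprehension plus an accumulation loop doing repeated addition) with a single index lookup and the closed-form cost evolution_costs[0] + i * evolution_costs[1].
import Mathlib
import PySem

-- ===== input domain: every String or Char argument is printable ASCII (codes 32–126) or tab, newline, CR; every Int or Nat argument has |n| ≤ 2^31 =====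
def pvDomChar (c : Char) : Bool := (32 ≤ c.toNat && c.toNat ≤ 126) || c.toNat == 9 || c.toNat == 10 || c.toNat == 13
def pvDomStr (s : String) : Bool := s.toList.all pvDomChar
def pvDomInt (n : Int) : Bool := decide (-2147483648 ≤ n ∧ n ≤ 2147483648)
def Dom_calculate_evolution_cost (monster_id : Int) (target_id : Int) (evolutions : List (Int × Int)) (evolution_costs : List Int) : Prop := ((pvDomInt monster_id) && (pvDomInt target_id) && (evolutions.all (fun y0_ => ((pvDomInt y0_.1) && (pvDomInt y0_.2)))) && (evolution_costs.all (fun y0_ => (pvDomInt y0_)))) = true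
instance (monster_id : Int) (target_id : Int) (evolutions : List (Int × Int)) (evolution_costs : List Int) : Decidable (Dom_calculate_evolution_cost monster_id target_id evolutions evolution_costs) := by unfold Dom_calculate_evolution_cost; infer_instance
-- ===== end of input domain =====

-- ===== PORT A =====
-- B is a simpler re-implementation: one index lookup plus the closed form
-- evolution_costs[0] + i * evolution_costs[1], instead of A's presence scan and
-- accumulation loop.  Exact equivalence is proved on Pre_ (where Python A returns).

-- A's for-loop: returns the accumulated cost at the first match, else the final accumulator.
def pvA_loop (target_id : Int) (step : Int) : List (Int × Int) → Int → Int
  | [], cost => cost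
  | (evo_id, _) :: rest, cost =>
      if evo_id = target_id then cost else pvA_loop target_id step rest (cost + step)

-- evolution_costs[0] / [1]: Python raises IndexError when absent; Pre_ excludes those
-- inputs, so .getD 0 is exact on the admitted domain.
def calculate_evolution_cost (monster_id : Int) (target_id : Int) (evolutions : List (Int × Int)) (evolution_costs : List Int) : Int :=
  if monster_id = target_id ∨ ((evolutions.filter (fun s => target_id = s.1)).map (fun _ => true)) = [] then 0
  else pvA_loop target_id ((PySem.List.pyGet? evolution_costs 1).getD 0) evolutions
         ((PySem.List.pyGet? evolution_costs 0).getD 0)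

-- ===== PORT B =====
-- the generator 'next((idx for idx, evo in enumerate(evolutions) if evo[0] == target_id), None)'
def pvB_find (target_id : Int) : List (Int × Int) → Nat → Option Nat
  | [], _ => none
  | (evo_id, _) :: rest, idx =>
      if evo_id = target_id then some idx else pvB_find target_id rest (idx + 1)

def calculate_evolution_cost_alt (monster_id : Int) (target_id : Int) (evolutions : List (Int × Int)) (evolution_costs : List Int) : Int :=
  if monster_id = target_id then 0
  else
    match pvB_find target_id evolutions 0 with
    | none => 0
    | some i =>
        if i = 0 then (PySem.List.pyGet? evolution_costs 0).getD 0
        else (PySem.List.pyGet? evolution_costs 0).getD 0 + (i : Int) * (PySem.List.pyGet? evolution_costs 1).getD 0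

-- ===== PRECONDITION & SPEC =====
-- Pre_ excludes exactly the inputs on which Python A raises IndexError: target_id is
-- reachable (so evolution_costs[0] is read) but evolution_costs is empty, or the first
-- match is not at index 0 (so evolution_costs[1] is read) but evolution_costs has fewer
-- than two elements.  A returns no value there (and B raises there too).
def Pre_calculate_evolution_cost (monster_id : Int) (target_id : Int) (evolutions : List (Int × Int)) (evolution_costs : List Int) : Prop :=
  monster_id ≠ target_id → (∃ p ∈ evolutions, p.1 = target_id) →
    (evolution_costs ≠ [] ∧ ((evolutions.head?.map Prod.fst = some target_id) ∨ 2 ≤ evolution_costs.length))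
instance (monster_id : Int) (target_id : Int) (evolutions : List (Int × Int)) (evolution_costs : List Int) : Decidable (Pre_calculate_evolution_cost monster_id target_id evolutions evolution_costs) := by unfold Pre_calculate_evolution_cost; infer_instance

def pvWitness_calculate_evolution_cost : Int × Int × (List (Int × Int)) × List Int :=
  (1, 3, [(2, 0), (3, 1)], [25, 100])

def Spec_calculate_evolution_cost (monster_id : Int) (target_id : Int) (evolutions : List (Int × Int)) (evolution_costs : List Int) (out : Int) : Prop := out = calculate_evolution_cost_alt monster_id target_id evolutions evolution_costs
instance (monster_id : Int) (target_id : Int) (evolutions : List (Int × Int)) (evolution_costs : List Int) (out : Int) : Decidable (Spec_calculate_evolution_cost monster_id target_id evolutions evolution_costs out) := by unfold Spec_calculate_evolution_cost; infer_instance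

-- ===== CLAIM (what is proved, stated in full; the proofs are below) =====
def Claim_equal_calculate_evolution_cost : Prop := ∀ (monster_id : Int) (target_id : Int) (evolutions : List (Int × Int)) (evolution_costs : List Int), Dom_calculate_evolution_cost monster_id target_id evolutions evolution_costs → Pre_calculate_evolution_cost monster_id target_id evolutions evolution_costs → Spec_calculate_evolution_cost monster_id target_id evolutions evolution_costs (calculate_evolution_cost monster_id target_id evolutions evolution_costs)

-- ===== LEMMAS AND PROOFS =====

lemma pvB_find_none_iff (t : Int) (l : List (Int × Int)) (idx : Nat) :
    pvB_find t l idx = none ↔ ∀ p ∈ l, p.1 ≠ t := by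
  induction l generalizing idx with
  | nil => simp [pvB_find]
  | cons hd tl ih =>
    obtain ⟨e, f⟩ := hd
    by_cases h : e = t <;> simp [pvB_find, h, ih]

lemma pvA_loop_of_find (t s : Int) (l : List (Int × Int)) (idx j : Nat) (c : Int)
    (h : pvB_find t l idx = some j) :
    pvA_loop t s l c = c + ((j : Int) - (idx : Int)) * s := by
  induction l generalizing idx c with
  | nil => simp [pvB_find] at h
  | cons hd tl ih =>
    obtain ⟨e, f⟩ := hd
    by_cases he : e = t
    · simp [pvB_find, he] at h
      subst h
      simp [pvA_loop, he]
    · simp [pvB_find, he] at h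
      have := ih (idx + 1) (c + s) h
      simp [pvA_loop, he, this]
      ring

-- ===== VERDICT (by name: the statement is the Claim_ definition above) =====
theorem calculate_evolution_cost_spec : Claim_equal_calculate_evolution_cost := by
  intro m t evos costs _ _
  unfold Spec_calculate_evolution_cost calculate_evolution_cost calculate_evolution_cost_alt
  by_cases hm : m = t
  · simp [hm]
  · simp only [hm, false_or]
    rcases h : pvB_find t evos 0 with _ | j
    · have hno : ∀ p ∈ evos, p.1 ≠ t := (pvB_find_none_iff t evos 0).1 h
      have : (evos.filter (fun s => decide (t = s.1))).map (fun _ => true) = [] := by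
        simp only [List.map_eq_nil_iff, List.filter_eq_nil_iff]
        intro p hp
        simp [Ne.symm (hno p hp)]
      simp [this]
    · have hne : ¬ ((evos.filter (fun s => decide (t = s.1))).map (fun _ => true) = []) := by
        intro hnil
        have hno : ∀ p ∈ evos, ¬ (t = p.1) := by
          simpa using hnil
        have hall : ∀ p ∈ evos, p.1 ≠ t := fun p hp heq => hno p hp heq.symm
        rw [(pvB_find_none_iff t evos 0).2 hall] at h
        simp at h
      rw [if_neg (by simpa using hne)]
      have hloop := pvA_loop_of_find t ((PySem.List.pyGet? costs 1).getD 0) evos 0 j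
        ((PySem.List.pyGet? costs 0).getD 0) h
      rw [hloop]
      by_cases hj : j = 0 <;> simp [hj]
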